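-- pv_equiv track=rewrite | github.com/jdewaen/cv-final | radiograph.py | count_bars
-- ===== SOURCE A (Python) =====
-- def count_bars(block):
--     in_bar = False
--     count = 0
--     for i in range(0, len(block)-1):
--         if block[i] == 0:
--             if in_bar:
--                 in_bar = False
--             continue
--         else:
--             if not in_bar:
--                 count += 1
--                 in_bar = True
--             continue
--     return count
-- ===== SOURCE B (Python) =====
-- def split_runs(xs):
--     """Partition xs into maximal runs of equal zero-ness (a hand-rolled groupby)."""
--     runs = []
--     while xs:
--         key = xs[0] != 0
--         i = 1
--         while i < len(xs) and (xs[i] != 0) == key: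
--             i += 1
--         runs.append(xs[:i])
--         xs = xs[i:]
--     return runs
--
--
-- def count_bars(block):
--     head = block[:len(block) - 1]
--     return sum(1 for run in split_runs(head) if run[0] != 0)
-- ===== Notes on version B (the rewrite author's own statement) =====
-- stated objective: idiomatic
-- what changed: Replaces the in_bar state flag and transition counting with a groupby-style decomposition: partition block[:-1] into maximal runs of equal zero-ness, then count the runs whose first element is nonzero.
import Mathlib
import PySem

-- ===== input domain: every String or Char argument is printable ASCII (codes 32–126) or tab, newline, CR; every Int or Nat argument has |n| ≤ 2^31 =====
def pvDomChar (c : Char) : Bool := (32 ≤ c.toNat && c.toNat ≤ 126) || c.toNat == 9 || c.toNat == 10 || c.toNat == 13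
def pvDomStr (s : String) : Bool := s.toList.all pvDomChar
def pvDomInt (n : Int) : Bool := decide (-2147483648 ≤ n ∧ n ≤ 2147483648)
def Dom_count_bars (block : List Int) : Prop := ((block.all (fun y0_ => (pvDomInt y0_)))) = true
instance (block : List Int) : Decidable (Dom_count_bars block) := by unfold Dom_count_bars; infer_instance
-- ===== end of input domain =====

-- B replaces A's in_bar state flag with a groupby-style pass: partition block[:-1]
-- into maximal runs of equal zero-ness and count the runs starting nonzero; objective: idiomatic.

-- ===== PORT A =====
def count_bars (block : List Int) : Int :=
  (((PySem.List.pyRange 0 ((block.length : Int) - 1) 1).foldl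
    (fun (s : Bool × Int) i =>
      let v := PySem.List.pyGetD block i 0
      if v == 0 then
        (if s.1 then (false, s.2) else s)
      else
        (if !s.1 then (true, s.2 + 1) else s))
    (false, 0)).2)

-- ===== PORT B =====
/-- B's `split_runs`: partition into maximal runs of equal zero-ness. -/
def pvSplitRuns : List Int → List (List Int)
  | [] => []
  | x :: xs =>
    let p : Int → Bool := fun y => ((y != 0) == (x != 0))
    (x :: xs.takeWhile p) :: pvSplitRuns (xs.dropWhile p)
termination_by l => l.length
decreasing_by
  simpa using Nat.lt_succ_of_le (List.length_dropWhile_le _ _)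

def count_bars_alt (block : List Int) : Int :=
  let head := block.take (block.length - 1)
  (((pvSplitRuns head).countP
      (fun run => match run with | [] => false | v :: _ => v != 0) : Nat) : Int)

-- ===== PRECONDITION & SPEC =====
def Spec_count_bars (block : List Int) (out : Int) : Prop := out = count_bars_alt block
instance (block : List Int) (out : Int) : Decidable (Spec_count_bars block out) := by unfold Spec_count_bars; infer_instance

-- ===== CLAIM (what is proved, stated in full; the proofs are below) =====
def Claim_equal_count_bars : Prop := ∀ (block : List Int), Dom_count_bars block → Spec_count_bars block (count_bars block)

-- ===== LEMMAS AND PROOFS =====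

/-- A's loop body as a named step function. -/
def pvStep (s : Bool × Int) (v : Int) : Bool × Int :=
  if v == 0 then (if s.1 then (false, s.2) else s)
  else (if !s.1 then (true, s.2 + 1) else s)

/-- Number of nonzero runs, as an Int. -/
def pvN (l : List Int) : Int :=
  (((pvSplitRuns l).countP
      (fun run => match run with | [] => false | v :: _ => v != 0) : Nat) : Int)

lemma pvN_zero_cons (xs : List Int) : pvN (0 :: xs) = pvN xs := by
  have h1 : ∀ ys : List Int,
      pvN (0 :: ys) = pvN (ys.dropWhile (fun y => ((y != 0) == false))) := by
    intro ys
    simp [pvN, pvSplitRuns]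
  rw [h1 xs]
  cases xs with
  | nil => simp
  | cons y ys =>
    by_cases hy : y = 0
    · subst hy
      rw [List.dropWhile_cons_of_pos (by simp)]
      exact (h1 ys).symm
    · rw [List.dropWhile_cons_of_neg (by simp [hy])]

lemma pvN_nz_cons (x : Int) (hx : x ≠ 0) (xs : List Int) :
    pvN (x :: xs) = 1 + pvN (xs.dropWhile (fun y => y != 0)) := by
  have hp : (fun y : Int => ((y != 0) == (x != 0))) = (fun y : Int => (y != 0)) := by
    funext y
    have h : (x != 0) = true := by simpa using hx
    rw [h]; simp
  simp [pvN, pvSplitRuns, hp, hx]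
  omega

lemma pvFold_runs (l : List Int) : ∀ c : Int,
    ((l.foldl pvStep (false, c)).2 = c + pvN l) ∧
    ((l.foldl pvStep (true, c)).2 = c + pvN (l.dropWhile (fun y => y != 0))) := by
  induction l with
  | nil => intro c; simp [pvN, pvSplitRuns]
  | cons x xs ih =>
    intro c
    by_cases hx : x = 0
    · subst hx
      have hstep₁ : pvStep (false, c) 0 = (false, c) := by simp [pvStep]
      have hstep₂ : pvStep (true, c) 0 = (false, c) := by simp [pvStep]
      constructor
      · rw [List.foldl_cons, hstep₁, (ih c).1, pvN_zero_cons]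
      · rw [List.foldl_cons, hstep₂, (ih c).1,
          List.dropWhile_cons_of_neg (by simp), pvN_zero_cons]
    · have hstep₁ : pvStep (false, c) x = (true, c + 1) := by simp [pvStep, hx]
      have hstep₂ : pvStep (true, c) x = (true, c) := by simp [pvStep, hx]
      constructor
      · rw [List.foldl_cons, hstep₁, (ih (c + 1)).2, pvN_nz_cons x hx]
        ring
      · rw [List.foldl_cons, hstep₂, (ih c).2,
          List.dropWhile_cons_of_pos (by simp [hx])]

lemma count_bars_eq_fold (block : List Int) :
    count_bars block = ((block.take (block.length - 1)).foldl pvStep (false, 0)).2 := by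
  unfold count_bars
  cases block with
  | nil => rfl
  | cons y ys =>
    set xs : List Int := y :: ys with hxs
    set head : List Int := xs.take (xs.length - 1) with hhead
    have hlen : (head.length : Int) = (xs.length : Int) - 1 := by
      have h1 : head.length = xs.length - 1 := by
        simp [hhead]
      rw [h1]
      have : 1 ≤ xs.length := by simp [hxs]
      omega
    rw [← hlen]
    have hcongr : (PySem.List.pyRange 0 ((head.length : Int)) 1).foldl
        (fun (s : Bool × Int) i => pvStep s (PySem.List.pyGetD xs i 0)) (false, 0)
      = (PySem.List.pyRange 0 ((head.length : Int)) 1).foldl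
        (fun (s : Bool × Int) i => pvStep s (PySem.List.pyGetD head i 0)) (false, 0) := by
      apply PySem.List.foldl_congr_mem
      intro acc i hi
      have hmem := (PySem.List.mem_pyRange_one).mp hi
      have h0 : 0 ≤ i := hmem.1
      have hlt : i < (head.length : Int) := hmem.2
      have hltn : i.toNat < head.length := by omega
      have hltx : i.toNat < xs.length := by
        have : head.length ≤ xs.length := by simp [hhead]
        omega
      rw [PySem.List.pyGetD_eq_getElem xs 0 h0 (by omega),
          PySem.List.pyGetD_eq_getElem head 0 h0 (by omega)]
      congr 1
      simp [hhead, List.getElem_take]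
    have hfold := PySem.List.foldl_pyRange_zero_pyGetD' head 0 pvStep (false, 0)
    calc ((PySem.List.pyRange 0 ((head.length : Int)) 1).foldl
        (fun (s : Bool × Int) i =>
          let v := PySem.List.pyGetD xs i 0
          if v == 0 then (if s.1 then (false, s.2) else s)
          else (if !s.1 then (true, s.2 + 1) else s)) (false, 0)).2
        = ((PySem.List.pyRange 0 ((head.length : Int)) 1).foldl
        (fun (s : Bool × Int) i => pvStep s (PySem.List.pyGetD head i 0)) (false, 0)).2 := by
          rw [← hcongr]; rfl
      _ = (head.foldl pvStep (false, 0)).2 := by rw [hfold]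

-- ===== VERDICT (by name: the statement is the Claim_ definition above) =====
theorem count_bars_spec : Claim_equal_count_bars := by
  intro block _
  unfold Spec_count_bars
  rw [count_bars_eq_fold, (pvFold_runs (block.take (block.length - 1)) 0).1]
  simp [count_bars_alt, pvN]
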